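-- pv_equiv track=rewrite | github.com/saiyan86/SkillSyncer | skillsyncer/hooks.py | _compose
-- ===== SOURCE A (Python) =====
-- START_MARKER = "# [skillsyncer:hook]"
--
-- END_MARKER = "# [/skillsyncer:hook]"
--
-- def _strip_existing_block(text: str) -> str:
--     if START_MARKER not in text:
--         return text
--     out_lines: list[str] = []
--     skipping = False
--     for line in text.splitlines(keepends=True):
--         if not skipping and line.strip().startswith(START_MARKER):
--             skipping = True
--             continue
--         if skipping and line.strip().startswith(END_MARKER):
--             skipping = False
--             continue
--         if not skipping:
--             out_lines.append(line)
--     return "".join(out_lines)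
--
-- def _compose(existing: str, template: str) -> str:
--     """Insert the template's marker block into ``existing``.
--
--     If existing has any prior block, it's removed first. Anything the
--     user added outside the marker block is preserved at the top; an
--     existing-but-empty hook (just a shebang) is treated as empty.
--     """
--     stripped = _strip_existing_block(existing).rstrip()
--     meaningful = "\n".join(
--         line for line in stripped.splitlines()
--         if line.strip() and not line.strip().startswith("#!")
--     ).strip()
--     if not meaningful:
--         return template if template.endswith("\n") else template + "\n"
--     if not stripped.startswith("#!"):
--         stripped = "#!/bin/bash\n" + stripped
--     body_lines = template.splitlines(keepends=True)
--     if body_lines and body_lines[0].startswith("#!"):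
--         body_lines = body_lines[1:]
--     body = "".join(body_lines)
--     return stripped + "\n\n" + body
-- ===== SOURCE B (Python) =====
-- START_MARKER = "# [skillsyncer:hook]"
--
-- END_MARKER = "# [/skillsyncer:hook]"
--
--
-- def _split_at(pred, lines):
--     """Split lines into (prefix before first match, rest starting at the match)."""
--     for i, l in enumerate(lines):
--         if pred(l):
--             return lines[:i], lines[i:]
--     return lines, []
--
--
-- def _is_start(line):
--     return line.strip().startswith(START_MARKER)
--
--
-- def _is_end(line):
--     return line.strip().startswith(END_MARKER)
--
--
-- def _strip_existing_block(text: str) -> str: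
--     def go(lines):
--         pre, rest = _split_at(_is_start, lines)
--         if not rest:
--             return lines
--         _, after = _split_at(_is_end, rest[1:])
--         if not after:
--             return pre
--         return pre + go(after[1:])
--
--     return "".join(go(text.splitlines(keepends=True)))
--
--
-- def _compose(existing: str, template: str) -> str:
--     stripped = _strip_existing_block(existing).rstrip()
--     has_content = any(
--         line.strip() and not line.strip().startswith("#!")
--         for line in stripped.splitlines()
--     )
--     if not has_content:
--         return template if template.endswith("\n") else template + "\n"
--     if not stripped.startswith("#!"):
--         stripped = "#!/bin/bash\n" + stripped
--     first = template.splitlines(keepends=True)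
--     if first and first[0].startswith("#!"):
--         body = template[len(first[0]):]
--     else:
--         body = template
--     return stripped + "\n\n" + body
-- ===== Notes on version B (the rewrite author's own statement) =====
-- stated objective: alternative
-- what changed: The flag-driven line loop of _strip_existing_block is replaced by a recursive split-at-marker decomposition (find the first START line, skip through the matching END line, recurse on the remainder), and the join+strip emptiness test for 'meaningful' content is replaced by a direct any() over the lines.
import Mathlib
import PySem

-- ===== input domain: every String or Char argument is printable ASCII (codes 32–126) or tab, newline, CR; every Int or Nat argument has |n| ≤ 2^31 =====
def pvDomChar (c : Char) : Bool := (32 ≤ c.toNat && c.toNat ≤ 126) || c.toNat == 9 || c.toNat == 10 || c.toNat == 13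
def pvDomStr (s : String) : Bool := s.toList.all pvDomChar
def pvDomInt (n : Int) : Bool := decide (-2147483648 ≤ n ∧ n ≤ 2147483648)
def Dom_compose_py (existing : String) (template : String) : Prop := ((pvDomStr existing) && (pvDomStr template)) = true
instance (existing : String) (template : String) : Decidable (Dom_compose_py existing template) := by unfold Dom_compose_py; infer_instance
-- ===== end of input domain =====

-- B replaces A's stateful skipping-flag loop in _strip_existing_block by a recursive
-- split-at-marker decomposition, and the join+strip "meaningful" emptiness test by any().

-- ===== shared helpers (used verbatim by BOTH Pythons: the module constants and the marker tests) =====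
def pvStart : List Char := "# [skillsyncer:hook]".toList
def pvEnd : List Char := "# [/skillsyncer:hook]".toList

def pvIsStart (line : List Char) : Bool :=
  PySem.Chars.startswith (PySem.Chars.strip line) pvStart

def pvIsEnd (line : List Char) : Bool :=
  PySem.Chars.startswith (PySem.Chars.strip line) pvEnd

-- text.splitlines(keepends=True), hand-ported: exact on the stated domain, whose only
-- line-break characters are '\n', '\r' and the pair '\r\n'.
def pvLineSpan : List Char → List Char × List Char
  | [] => ([], [])
  | c :: t =>
    if c = '\n' then (['\n'], t)
    else if c = '\r' then
      match t with
      | '\n' :: t2 => (['\r', '\n'], t2)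
      | _ => (['\r'], t)
    else
      let p := pvLineSpan t
      (c :: p.1, p.2)

-- the next two lemmas are termination helpers for pvSplitKeep (cited in decreasing_by)
theorem pvLineSpan_append (cs : List Char) :
    (pvLineSpan cs).1 ++ (pvLineSpan cs).2 = cs := by
  induction cs using pvLineSpan.induct <;> simp_all [pvLineSpan]

theorem pvLineSpan_snd_lt (c : Char) (t : List Char) :
    (pvLineSpan (c :: t)).2.length < (c :: t).length := by
  have h := pvLineSpan_append (c :: t)
  have hne : (pvLineSpan (c :: t)).1 ≠ [] := by
    simp only [pvLineSpan]
    split_ifs <;> (try split) <;> simp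
  calc (pvLineSpan (c :: t)).2.length
      < (pvLineSpan (c :: t)).1.length + (pvLineSpan (c :: t)).2.length := by
        have := List.length_pos_of_ne_nil hne; omega
    _ = (c :: t).length := by rw [← List.length_append, h]

def pvSplitKeep : List Char → List (List Char)
  | [] => []
  | c :: t => (pvLineSpan (c :: t)).1 :: pvSplitKeep (pvLineSpan (c :: t)).2
  termination_by cs => cs.length
  decreasing_by exact pvLineSpan_snd_lt c t

-- ===== PORT A =====

-- A's _strip_existing_block: the skipping-flag loop over splitlines(keepends=True).
def pvStepA (st : Bool × List (List Char)) (line : List Char) : Bool × List (List Char) :=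
  if !st.1 && pvIsStart line then (true, st.2)
  else if st.1 && pvIsEnd line then (false, st.2)
  else if !st.1 then (st.1, st.2 ++ [line])
  else st

def pvStripA (text : List Char) : List Char :=
  if PySem.Chars.isIn pvStart text then
    (((pvSplitKeep text).foldl pvStepA (false, [])).2).flatten
  else text

def compose_py (existing : String) (template : String) : String :=
  let stripped := PySem.Chars.rstrip (pvStripA existing.toList)
  let meaningful := PySem.Chars.strip (PySem.Chars.join ['\n']
    ((PySem.Chars.splitlines stripped).filter (fun line =>
      !(PySem.Chars.strip line).isEmpty &&
      !PySem.Chars.startswith (PySem.Chars.strip line) "#!".toList)))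
  if meaningful.isEmpty then
    (if PySem.Chars.endswith template.toList ['\n'] then template
     else String.ofList (template.toList ++ ['\n']))
  else
    let stripped2 := if !PySem.Chars.startswith stripped "#!".toList then
        "#!/bin/bash\n".toList ++ stripped
      else stripped
    let bodyLines := pvSplitKeep template.toList
    let bodyLines2 := match bodyLines with
      | b0 :: rest => if PySem.Chars.startswith b0 "#!".toList then rest else bodyLines
      | [] => bodyLines
    String.ofList (stripped2 ++ "\n\n".toList ++ bodyLines2.flatten)

-- ===== PORT B =====

-- B's _split_at: (prefix before the first line satisfying pred, rest starting at it).
def pvSplitAt (p : List Char → Bool) : List (List Char) → List (List Char) × List (List Char)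
  | [] => ([], [])
  | l :: rest =>
    if p l then ([], l :: rest)
    else
      let q := pvSplitAt p rest
      (l :: q.1, q.2)

-- termination helper for pvGoB (cited in decreasing_by)
theorem pvSplitAt_snd_length_le (p : List Char → Bool) (xs : List (List Char)) :
    (pvSplitAt p xs).2.length ≤ xs.length := by
  induction xs with
  | nil => simp [pvSplitAt]
  | cons l rest ih =>
    simp only [pvSplitAt]
    split
    · simp
    · simpa using Nat.le_succ_of_le ih

-- B's recursive go: strip marker blocks by splitting at the first START line.
def pvGoB (lines : List (List Char)) : List (List Char) :=
  let s := pvSplitAt pvIsStart lines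
  if s.2 = [] then lines
  else
    let a := pvSplitAt pvIsEnd s.2.tail
    if a.2 = [] then s.1
    else s.1 ++ pvGoB a.2.tail
  termination_by lines.length
  decreasing_by
    have h3 : (pvSplitAt pvIsStart lines).2.length ≤ lines.length :=
      pvSplitAt_snd_length_le _ _
    have h4 : (pvSplitAt pvIsEnd (pvSplitAt pvIsStart lines).2.tail).2.length
        ≤ (pvSplitAt pvIsStart lines).2.tail.length :=
      pvSplitAt_snd_length_le _ _
    simp only [s, a] at *
    rename_i hs ha
    have h5 := List.length_pos_of_ne_nil hs
    have h6 := List.length_pos_of_ne_nil ha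
    simp only [List.length_tail] at *
    omega

def pvStripB (text : List Char) : List Char :=
  (pvGoB (pvSplitKeep text)).flatten

def compose_py_alt (existing : String) (template : String) : String :=
  let stripped := PySem.Chars.rstrip (pvStripB existing.toList)
  let hasContent := (PySem.Chars.splitlines stripped).any (fun line =>
      !(PySem.Chars.strip line).isEmpty &&
      !PySem.Chars.startswith (PySem.Chars.strip line) "#!".toList)
  if !hasContent then
    (if PySem.Chars.endswith template.toList ['\n'] then template
     else String.ofList (template.toList ++ ['\n']))
  else
    let stripped2 := if !PySem.Chars.startswith stripped "#!".toList then
        "#!/bin/bash\n".toList ++ stripped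
      else stripped
    let body := match pvSplitKeep template.toList with
      | f0 :: _ => if PySem.Chars.startswith f0 "#!".toList then
          template.toList.drop f0.length
        else template.toList
      | [] => template.toList
    String.ofList (stripped2 ++ "\n\n".toList ++ body)

-- ===== PRECONDITION & SPEC =====
def Spec_compose_py (existing : String) (template : String) (out : String) : Prop := out = compose_py_alt existing template
instance (existing : String) (template : String) (out : String) : Decidable (Spec_compose_py existing template out) := by unfold Spec_compose_py; infer_instance

-- ===== CLAIM (what is proved, stated in full; the proofs are below) =====
def Claim_equal_compose_py : Prop := ∀ (existing : String) (template : String), Dom_compose_py existing template → Spec_compose_py existing template (compose_py existing template)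

-- ===== LEMMAS AND PROOFS =====

theorem pvSplitKeep_flatten (cs : List Char) :
    (pvSplitKeep cs).flatten = cs := by
  induction cs using pvSplitKeep.induct with
  | case1 => simp [pvSplitKeep]
  | case2 c t ih =>
    rw [pvSplitKeep]
    simp only [List.flatten_cons, ih]
    exact pvLineSpan_append _

theorem pvGoB_nil : pvGoB [] = [] := by
  simp [pvGoB, pvSplitAt]

-- proof-only helper: B's behaviour seen from inside a block (A's skipping = True state)
def pvSkipB (lines : List (List Char)) : List (List Char) :=
  if (pvSplitAt pvIsEnd lines).2 = [] then []
  else pvGoB (pvSplitAt pvIsEnd lines).2.tail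

theorem pvGoB_cons_not_start (l : List Char) (rest : List (List Char))
    (h : pvIsStart l = false) : pvGoB (l :: rest) = l :: pvGoB rest := by
  rw [pvGoB, pvGoB]
  simp only [pvSplitAt, h, Bool.false_eq_true, if_false]
  by_cases h2 : (pvSplitAt pvIsStart rest).2 = []
  · simp [h2]
  · simp only [h2]
    split_ifs <;> simp

theorem pvGoB_cons_start (l : List Char) (rest : List (List Char))
    (h : pvIsStart l = true) : pvGoB (l :: rest) = pvSkipB rest := by
  rw [pvGoB, pvSkipB]
  simp only [pvSplitAt, h, if_true, List.tail_cons]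
  split_ifs with h1 h2 <;> simp_all

theorem pvSkipB_nil : pvSkipB [] = [] := by
  simp [pvSkipB, pvSplitAt]

theorem pvSkipB_cons_end (l : List Char) (rest : List (List Char))
    (h : pvIsEnd l = true) : pvSkipB (l :: rest) = pvGoB rest := by
  simp [pvSkipB, pvSplitAt, h]

theorem pvSkipB_cons_not_end (l : List Char) (rest : List (List Char))
    (h : pvIsEnd l = false) : pvSkipB (l :: rest) = pvSkipB rest := by
  rw [pvSkipB, pvSkipB]
  simp only [pvSplitAt, h, Bool.false_eq_true, if_false]

-- the central invariant: A's flag loop against B's recursion, in both flag states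
theorem pvLoop_eq (lines : List (List Char)) : ∀ acc : List (List Char),
    ((lines.foldl pvStepA (false, acc)).2 = acc ++ pvGoB lines)
    ∧ ((lines.foldl pvStepA (true, acc)).2 = acc ++ pvSkipB lines) := by
  induction lines with
  | nil => intro acc; simp [pvGoB_nil, pvSkipB_nil]
  | cons l rest ih =>
    intro acc
    constructor
    · rcases h : pvIsStart l with _ | _
      · have hs : pvStepA (false, acc) l = (false, acc ++ [l]) := by
          simp [pvStepA, h]
        rw [List.foldl_cons, hs, (ih (acc ++ [l])).1,
          pvGoB_cons_not_start l rest h]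
        simp
      · have hs : pvStepA (false, acc) l = (true, acc) := by
          simp [pvStepA, h]
        rw [List.foldl_cons, hs, (ih acc).2, pvGoB_cons_start l rest h]
    · rcases h : pvIsEnd l with _ | _
      · have hs : pvStepA (true, acc) l = (true, acc) := by
          simp [pvStepA, h]
        rw [List.foldl_cons, hs, (ih acc).2, pvSkipB_cons_not_end l rest h]
      · have hs : pvStepA (true, acc) l = (false, acc) := by
          simp [pvStepA, h]
        rw [List.foldl_cons, hs, (ih acc).1, pvSkipB_cons_end l rest h]

theorem pvGoB_of_no_start (lines : List (List Char))
    (h : ∀ l ∈ lines, pvIsStart l = false) : pvGoB lines = lines := by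
  induction lines with
  | nil => exact pvGoB_nil
  | cons l rest ih =>
    rw [pvGoB_cons_not_start l rest (h l (by simp)),
      ih (fun x hx => h x (by simp [hx]))]

-- strip s = [] iff every character is whitespace
theorem pvStrip_eq_nil_iff (cs : List Char) :
    PySem.Chars.strip cs = [] ↔ ∀ c ∈ cs, PySem.Chars.isspace c = true := by
  simp only [PySem.Chars.strip, PySem.Chars.rstrip, PySem.Chars.lstrip,
    List.reverse_eq_nil_iff, List.dropWhile_eq_nil_iff, List.mem_reverse]
  constructor
  · intro h c hc
    by_cases hmem : c ∈ cs.dropWhile PySem.Chars.isspace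
    · exact h c hmem
    · have hsplit := List.takeWhile_append_dropWhile (p := PySem.Chars.isspace) (l := cs)
      rw [← hsplit] at hc
      rcases List.mem_append.1 hc with h1 | h1
      · exact List.mem_takeWhile_imp h1
      · exact absurd h1 hmem
  · intro h c hc
    exact h c ((List.dropWhile_suffix _).subset hc)

-- strip s is an infix of s
theorem pvStrip_infix (cs : List Char) : PySem.Chars.strip cs <:+: cs := by
  have h1 : PySem.Chars.strip cs <+: PySem.Chars.lstrip cs := by
    simp only [PySem.Chars.strip, PySem.Chars.rstrip]
    have hsuf := List.dropWhile_suffix (l := (PySem.Chars.lstrip cs).reverse)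
      (p := PySem.Chars.isspace)
    simpa using List.reverse_prefix.2 hsuf
  have h2 : PySem.Chars.lstrip cs <:+ cs := List.dropWhile_suffix _
  exact h1.isInfix.trans h2.isInfix

theorem pvNoStart_of_not_isIn (cs : List Char)
    (h : PySem.Chars.isIn pvStart cs = false) :
    ∀ l ∈ pvSplitKeep cs, pvIsStart l = false := by
  intro l hl
  by_contra hcon
  rw [Bool.not_eq_false] at hcon
  have h1 : pvStart <+: PySem.Chars.strip l :=
    (PySem.Chars.startswith_iff _ _).1 hcon
  have h2 : pvStart <:+: l := h1.isInfix.trans (pvStrip_infix l)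
  have h3 : l <:+: cs := by
    rw [← pvSplitKeep_flatten cs]
    exact List.infix_of_mem_flatten hl
  have : PySem.Chars.isIn pvStart cs = true :=
    (PySem.Chars.isIn_iff_infix _ _).2 (h2.trans h3)
  simp [this] at h

theorem pvStrip_eq (cs : List Char) : pvStripA cs = pvStripB cs := by
  unfold pvStripA pvStripB
  rcases h : PySem.Chars.isIn pvStart cs with _ | _
  · simp only [Bool.false_eq_true, if_false]
    rw [pvGoB_of_no_start _ (pvNoStart_of_not_isIn cs h), pvSplitKeep_flatten]
  · simp only [if_true]
    rw [(pvLoop_eq (pvSplitKeep cs) []).1]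
    simp

-- the "meaningful nonempty" test of A equals B's any()
theorem pvMeaningful_eq (lines : List (List Char)) :
    (PySem.Chars.strip (PySem.Chars.join ['\n']
      (lines.filter (fun line =>
        !(PySem.Chars.strip line).isEmpty &&
        !PySem.Chars.startswith (PySem.Chars.strip line) "#!".toList)))).isEmpty
    = !(lines.any (fun line =>
        !(PySem.Chars.strip line).isEmpty &&
        !PySem.Chars.startswith (PySem.Chars.strip line) "#!".toList)) := by
  set p : List Char → Bool := fun line =>
    !(PySem.Chars.strip line).isEmpty &&
    !PySem.Chars.startswith (PySem.Chars.strip line) "#!".toList with hp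
  rcases hany : lines.any p with _ | _
  · have hfil : lines.filter p = [] := by
      rw [List.filter_eq_nil_iff]
      intro a ha
      have := List.any_eq_false.1 hany a ha
      simp [this]
    rw [hfil, PySem.Chars.join_nil]
    simp [PySem.Chars.strip, PySem.Chars.lstrip, PySem.Chars.rstrip]
  · rcases hfil : lines.filter p with _ | ⟨l, t⟩
    · exfalso
      rcases List.any_eq_true.1 hany with ⟨a, ha, hpa⟩
      have : a ∈ lines.filter p := List.mem_filter.2 ⟨ha, hpa⟩
      simp [hfil] at this
    · have hlmem : l ∈ lines.filter p := by rw [hfil]; simp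
      have hpl : p l = true := (List.mem_filter.1 hlmem).2
      have hsl : PySem.Chars.strip l ≠ [] := by
        rw [hp] at hpl
        simp only [Bool.and_eq_true, Bool.not_eq_true'] at hpl
        simpa [List.isEmpty_iff] using hpl.1
      obtain ⟨c, hc, hcs⟩ : ∃ c ∈ l, PySem.Chars.isspace c = false := by
        by_contra hno
        push Not at hno
        exact hsl ((pvStrip_eq_nil_iff l).2 (fun c hc => by
          have := hno c hc; simpa using this))
      have hcj : c ∈ PySem.Chars.join ['\n'] (l :: t) := by
        rcases t with _ | ⟨b, t'⟩
        · simpa [PySem.Chars.join, List.intercalate] using hc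
        · rw [PySem.Chars.join_cons_cons]
          exact List.mem_append.2 (Or.inl (List.mem_append.2 (Or.inl hc)))
      have hne : PySem.Chars.strip (PySem.Chars.join ['\n'] (l :: t)) ≠ [] := by
        intro h0
        have := (pvStrip_eq_nil_iff _).1 h0 c hcj
        rw [this] at hcs
        exact Bool.noConfusion hcs
      simpa [List.isEmpty_iff] using hne

-- body of the template: dropping the first keepends-line equals dropping its length
theorem pvBody_eq (t : List Char) :
    (match pvSplitKeep t with
      | b0 :: rest => if PySem.Chars.startswith b0 "#!".toList then rest else pvSplitKeep t
      | [] => pvSplitKeep t).flatten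
    = (match pvSplitKeep t with
      | f0 :: _ => if PySem.Chars.startswith f0 "#!".toList then t.drop f0.length else t
      | [] => t) := by
  rcases h : pvSplitKeep t with _ | ⟨f0, rest⟩
  · have h0 := pvSplitKeep_flatten t
    rw [h] at h0
    simpa using h0
  · have h0 := pvSplitKeep_flatten t
    rw [h, List.flatten_cons] at h0
    by_cases hsw : PySem.Chars.startswith f0 "#!".toList = true
    · simp only [hsw, if_true]
      rw [← h0, List.drop_left]
    · simp only [hsw, Bool.false_eq_true, if_false, List.flatten_cons]
      exact h0

-- ===== VERDICT (by name: the statement is the Claim_ definition above) =====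
theorem compose_py_spec : Claim_equal_compose_py := by
  intro existing template _
  unfold Spec_compose_py
  show compose_py existing template = compose_py_alt existing template
  simp only [compose_py, compose_py_alt]
  rw [pvStrip_eq]
  rw [pvMeaningful_eq]
  rcases hany : (PySem.Chars.splitlines (PySem.Chars.rstrip (pvStripB existing.toList))).any
      (fun line =>
        !(PySem.Chars.strip line).isEmpty &&
        !PySem.Chars.startswith (PySem.Chars.strip line) "#!".toList) with _ | _
  · simp
  · simp only [Bool.not_true, Bool.false_eq_true, if_false]
    rw [pvBody_eq]
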